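-- pv_equiv track=rewrite | github.com/ioridev/AtCoder | abc295/d/main.py | is_happy
-- ===== SOURCE A (Python) =====
-- def is_happy(substring):
--     # Count the occurrences of each digit
--     digit_count = {}
--     for digit in substring:
--         if digit in digit_count:
--             digit_count[digit] += 1
--         else:
--             digit_count[digit] = 1
--
--     # Check if the counts are even, which means the substring can be rearranged into a happy string
--     for count in digit_count.values():
--         if count % 2 != 0:
--             return False
--     return True
-- ===== SOURCE B (Python) =====
-- def is_happy(substring):
--     # One parity-toggling pass: keep the set of characters seen an odd number
--     # of times so far; all counts are even iff the set ends up empty.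
--     odd = set()
--     for ch in substring:
--         if ch in odd:
--             odd.remove(ch)
--         else:
--             odd.add(ch)
--     return not odd
-- ===== Notes on version B (the rewrite author's own statement) =====
-- stated objective: idiomatic
-- what changed: Replaces the count dictionary plus a second parity-checking loop over the counts with a single pass that toggles each character in/out of an odd-parity set and finally tests that set for emptiness.
import Mathlib
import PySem

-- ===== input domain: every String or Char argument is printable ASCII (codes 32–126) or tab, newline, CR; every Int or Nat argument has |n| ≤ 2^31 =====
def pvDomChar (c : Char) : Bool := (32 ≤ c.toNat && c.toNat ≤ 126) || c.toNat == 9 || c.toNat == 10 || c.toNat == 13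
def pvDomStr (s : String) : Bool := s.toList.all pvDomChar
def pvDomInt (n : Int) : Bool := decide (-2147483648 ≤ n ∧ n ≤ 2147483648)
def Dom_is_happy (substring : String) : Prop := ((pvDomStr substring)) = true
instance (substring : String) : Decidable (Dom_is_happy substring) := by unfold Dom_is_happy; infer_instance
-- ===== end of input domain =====

-- B replaces A's count dictionary + separate parity-checking loop by one
-- parity-toggling pass over a set, then tests that set for emptiness (idiomatic).

-- ===== PORT A =====
def is_happy (substring : String) : Bool :=
  -- digit_count = {}; for digit in substring: …
  let digit_count := substring.toList.foldl
    (fun d digit =>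
      if d.contains digit then d.insert digit (d.getD digit 0 + 1)
      else d.insert digit 1)
    (PySem.Dict.empty : PySem.Dict Char Int)
  -- for count in digit_count.values(): if count % 2 != 0: return False; return True
  digit_count.values.all (fun count => !(PySem.Int.mod count 2 != 0))

-- ===== PORT B =====
def is_happy_alt (substring : String) : Bool :=
  -- odd = set(); for ch in substring: toggle ch
  let odd := substring.toList.foldl
    (fun s ch =>
      if PySem.Set.contains s ch then PySem.Set.discard s ch  -- odd.remove(ch): ch is present, so exact
      else PySem.Set.add s ch)
    (PySem.Set.empty : PySem.Set Char)
  -- return not odd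
  PySem.Set.len odd == 0

-- ===== PRECONDITION & SPEC =====
def Spec_is_happy (substring : String) (out : Bool) : Prop := out = is_happy_alt substring
instance (substring : String) (out : Bool) : Decidable (Spec_is_happy substring out) := by unfold Spec_is_happy; infer_instance

-- ===== CLAIM (what is proved, stated in full; the proofs are below) =====
def Claim_equal_is_happy : Prop := ∀ (substring : String), Dom_is_happy substring → Spec_is_happy substring (is_happy substring)

-- ===== LEMMAS AND PROOFS =====

-- A's fold is exactly the 'd.insert x (d.getD x 0 + 1)' counting loop
theorem isHappy_fold_eq_counter (l : List Char) :
    l.foldl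
      (fun (d : PySem.Dict Char Int) digit =>
        if d.contains digit then d.insert digit (d.getD digit 0 + 1)
        else d.insert digit 1)
      PySem.Dict.empty = PySem.Dict.counter l := by
  rw [← PySem.Dict.foldl_insert_getD_add_one_eq_counter]
  congr 1
  funext d c
  by_cases h : d.contains c = true
  · simp [h]
  · have h0 : d.getD c 0 = 0 := by
      simp only [PySem.Dict.getD]
      rw [(PySem.Dict.get?_eq_none_iff_contains d c).2 (by simpa using h)]
      rfl
    simp [h, h0]

-- membership in B's toggling fold = parity of the count
theorem mem_toggle_fold (l : List Char) (s : PySem.Set Char) (c : Char) :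
    (c ∈ l.foldl
      (fun (s : PySem.Set Char) ch =>
        if PySem.Set.contains s ch then PySem.Set.discard s ch
        else PySem.Set.add s ch) s) ↔ ((c ∈ s) ↔ l.count c % 2 = 0) := by
  induction l generalizing s with
  | nil => simp
  | cons x t ih =>
    simp only [List.foldl_cons]
    rw [ih]
    by_cases hcx : c = x
    · subst hcx
      by_cases hs : c ∈ s
      · simp [PySem.Set.contains_eq_listContains, hs, PySem.Set.mem_discard,
              List.count_cons_self]
        omega
      · simp [PySem.Set.contains_eq_listContains, hs, List.count_cons_self]
        omega
    · have hcnt : (x :: t).count c = t.count c := by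
        simp [Ne.symm hcx]
      by_cases hx : x ∈ s
      · simp [PySem.Set.contains_eq_listContains, hx, PySem.Set.mem_discard, hcx, hcnt]
      · simp [PySem.Set.contains_eq_listContains, hx, hcx, hcnt]

-- B's toggling fold ends empty iff every character count is even
theorem toggle_fold_nil_iff (l : List Char) :
    l.foldl
      (fun (s : PySem.Set Char) ch =>
        if PySem.Set.contains s ch then PySem.Set.discard s ch
        else PySem.Set.add s ch) PySem.Set.empty = [] ↔
      ∀ c : Char, l.count c % 2 = 0 := by
  constructor
  · intro h c
    by_contra hodd
    have hmem := (mem_toggle_fold l PySem.Set.empty c).mpr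
      (by simp [PySem.Set.empty]; omega)
    rw [h] at hmem
    simp at hmem
  · intro h
    cases hfold : l.foldl
        (fun (s : PySem.Set Char) ch =>
          if PySem.Set.contains s ch then PySem.Set.discard s ch
          else PySem.Set.add s ch) PySem.Set.empty with
    | nil => rfl
    | cons y ys =>
      have hy : y ∈ l.foldl
          (fun (s : PySem.Set Char) ch =>
            if PySem.Set.contains s ch then PySem.Set.discard s ch
            else PySem.Set.add s ch) PySem.Set.empty := by
        rw [hfold]; exact List.mem_cons_self
      rw [mem_toggle_fold] at hy
      have := hy.mpr (h y)
      simp [PySem.Set.empty] at this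

-- B returns true iff every character count in the string is even
theorem is_happy_alt_iff (substring : String) :
    is_happy_alt substring = true ↔
      ∀ c : Char, substring.toList.count c % 2 = 0 := by
  unfold is_happy_alt
  simp only [PySem.Set.len, beq_iff_eq, Nat.cast_eq_zero, List.length_eq_zero_iff]
  exact toggle_fold_nil_iff substring.toList

-- A returns true iff every character count in the string is even
theorem is_happy_iff (substring : String) :
    is_happy substring = true ↔
      ∀ c : Char, substring.toList.count c % 2 = 0 := by
  unfold is_happy
  rw [isHappy_fold_eq_counter]
  simp only [PySem.Dict.values, PySem.Dict.items_counter, List.map_map, List.all_map,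
    List.all_eq_true]
  constructor
  · intro h c
    by_cases hc : c ∈ substring.toList
    · have := h c (by rw [PySem.Set.mem_ofList]; exact hc)
      simp only [Function.comp] at this
      have hm : PySem.Int.mod ((substring.toList.count c : Nat) : Int) 2
          = ((substring.toList.count c % 2 : Nat) : Int) := by
        exact_mod_cast PySem.Int.mod_natCast (substring.toList.count c) 2
      rw [hm] at this
      have h2 : 2 ∣ substring.toList.count c := by
        have h2' : (2 : Int) ∣ ((substring.toList.count c : Nat) : Int) := by
          simpa using this
        exact_mod_cast h2'
      omega
    · simp [List.count_eq_zero_of_not_mem hc]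
  · intro h c _
    have hm : PySem.Int.mod ((substring.toList.count c : Nat) : Int) 2
        = ((substring.toList.count c % 2 : Nat) : Int) := by
      exact_mod_cast PySem.Int.mod_natCast (substring.toList.count c) 2
    simp only [Function.comp]
    rw [hm, h c]
    simp

-- ===== VERDICT (by name: the statement is the Claim_ definition above) =====
theorem is_happy_spec : Claim_equal_is_happy := by
  intro substring _
  unfold Spec_is_happy
  rw [Bool.eq_iff_iff, is_happy_iff, is_happy_alt_iff]
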